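-- pv_equiv track=rewrite | github.com/Dj3ni/Exercices-Python--1- | Exercices/Fonctions/longexercice.py | grid_construct
-- ===== SOURCE A (Python) =====
-- def grid_construct(n_line,n_col):
--     n = n_line * n_col
--     grid = []
--     line_fill = ""
--     y = 1
--     z = n_col
--
--     for column in range(n_line):
--         line_fill = list(range(y,z+1))
--         grid.append(line_fill)
--         y += n_col
--         z+= n_col
--
--     return grid
-- ===== SOURCE B (Python) =====
-- def grid_construct(n_line, n_col):
--     rows = max(n_line, 0)
--     flat = list(range(1, rows * n_col + 1))
--     return [flat[i * n_col:(i + 1) * n_col] for i in range(rows)]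
-- ===== Notes on version B (the rewrite author's own statement) =====
-- stated objective: idiomatic
-- what changed: B materialises the full flat sequence range(1, n_line*n_col+1) once and partitions it into n_col-sized slices, replacing A's per-row incremental (y, z) bound bookkeeping and per-row range construction.
import Mathlib
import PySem

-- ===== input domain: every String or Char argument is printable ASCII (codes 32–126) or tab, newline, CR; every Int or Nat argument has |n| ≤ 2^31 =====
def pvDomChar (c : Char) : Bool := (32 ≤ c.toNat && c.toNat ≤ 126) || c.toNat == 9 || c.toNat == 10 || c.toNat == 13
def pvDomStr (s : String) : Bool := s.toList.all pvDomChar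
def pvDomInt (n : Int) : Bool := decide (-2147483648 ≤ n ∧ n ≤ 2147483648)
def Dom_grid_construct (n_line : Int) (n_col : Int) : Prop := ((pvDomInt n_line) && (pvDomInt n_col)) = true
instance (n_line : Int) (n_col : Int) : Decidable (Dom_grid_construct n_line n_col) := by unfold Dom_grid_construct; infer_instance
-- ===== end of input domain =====

-- B replaces A's per-row incremental (y, z) bound bookkeeping by materialising the flat
-- sequence 1..n_line*n_col once and partitioning it into n_col-sized slices (idiomatic).

-- ===== PORT A =====
-- literal port of A: a fold over range(n_line) carrying the state (grid, y, z);
-- the dead initialisations 'n = n_line*n_col' and 'line_fill = ""' have no effect and are not carried.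
def grid_construct (n_line : Int) (n_col : Int) : List (List Int) :=
  let grid : List (List Int) := []
  let y : Int := 1
  let z : Int := n_col
  let st := (PySem.List.pyRange 0 n_line 1).foldl
    (fun (st : List (List Int) × Int × Int) _ =>
      let line_fill := PySem.List.pyRange st.2.1 (st.2.2 + 1) 1
      (st.1 ++ [line_fill], st.2.1 + n_col, st.2.2 + n_col))
    (grid, y, z)
  st.1

-- ===== PORT B =====
def grid_construct_alt (n_line : Int) (n_col : Int) : List (List Int) :=
  let rows := max n_line 0
  let flat := PySem.List.pyRange 1 (rows * n_col + 1) 1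
  (PySem.List.pyRange 0 rows 1).map
    (fun i => PySem.List.slice flat (some (i * n_col)) (some ((i + 1) * n_col)))

-- ===== PRECONDITION & SPEC =====
def Spec_grid_construct (n_line : Int) (n_col : Int) (out : List (List Int)) : Prop := out = grid_construct_alt n_line n_col
instance (n_line : Int) (n_col : Int) (out : List (List Int)) : Decidable (Spec_grid_construct n_line n_col out) := by unfold Spec_grid_construct; infer_instance

-- ===== CLAIM (what is proved, stated in full; the proofs are below) =====
def Claim_equal_grid_construct : Prop := ∀ (n_line : Int) (n_col : Int), Dom_grid_construct n_line n_col → Spec_grid_construct n_line n_col (grid_construct n_line n_col)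

-- ===== LEMMAS AND PROOFS =====

-- invariant of A's loop: after consuming l, the grid is acc followed by one row per step,
-- the j-th row being range(y + j*n_col, z + j*n_col + 1)
theorem grid_fold_rows (n_col : Int) (l : List Int) (acc : List (List Int)) (y z : Int) :
    (l.foldl
      (fun (st : List (List Int) × Int × Int) _ =>
        (st.1 ++ [PySem.List.pyRange st.2.1 (st.2.2 + 1) 1], st.2.1 + n_col, st.2.2 + n_col))
      (acc, y, z)).1
    = acc ++ (List.range l.length).map
        (fun (j : Nat) => PySem.List.pyRange (y + (j : Int) * n_col) (z + (j : Int) * n_col + 1) 1) := by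
  induction l generalizing acc y z with
  | nil => simp
  | cons h t ih =>
    rw [List.foldl_cons]
    rw [ih]
    rw [List.length_cons, List.range_succ_eq_map, List.map_cons, List.map_map,
      List.append_assoc, List.singleton_append]
    congr 1
    congr 1
    · norm_num
    · apply List.map_congr_left
      intro j _
      simp only [Function.comp]
      congr 1 <;> push_cast <;> ring

-- the j-th slice of the flat sequence is exactly A's j-th row
theorem slice_row (n_line n_col : Int) (j : Nat) (hj : (j : Int) < n_line) :
    PySem.List.slice (PySem.List.pyRange 1 (n_line * n_col + 1) 1)
        (some ((j : Int) * n_col)) (some (((j : Int) + 1) * n_col))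
    = PySem.List.pyRange (1 + (j : Int) * n_col) (n_col + (j : Int) * n_col + 1) 1 := by
  rcases le_or_gt n_col 0 with hc | hc
  · -- empty rows: the flat sequence is empty and so is each row
    have hflat : PySem.List.pyRange 1 (n_line * n_col + 1) 1 = [] := by
      apply PySem.List.pyRange_one_eq_nil
      nlinarith
    have hrow : PySem.List.pyRange (1 + (j : Int) * n_col) (n_col + (j : Int) * n_col + 1) 1 = [] := by
      apply PySem.List.pyRange_one_eq_nil
      omega
    rw [hflat, hrow]
    simp [PySem.List.slice]
  · -- positive n_col: split the flat range at the slice boundaries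
    have hjn : 0 < n_line := lt_of_le_of_lt (Int.natCast_nonneg j) hj
    set c : Nat := n_col.toNat with hc'
    set m : Nat := n_line.toNat with hm'
    have hcc : (c : Int) = n_col := Int.toNat_of_nonneg hc.le
    have hmm : (m : Int) = n_line := Int.toNat_of_nonneg hjn.le
    have hjm : j + 1 ≤ m := by omega
    have e1 : (j : Int) * n_col = ((j * c : Nat) : Int) := by push_cast [hcc]; ring
    have e2 : ((j : Int) + 1) * n_col = (((j + 1) * c : Nat) : Int) := by push_cast [hcc]; ring
    have eflat : n_line * n_col + 1 = ((m * c : Nat) : Int) + 1 := by push_cast [hcc, hmm]; ring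
    rw [e1, e2, PySem.List.slice_natCast, eflat]
    have hsplit1 : PySem.List.pyRange 1 (((m * c : Nat) : Int) + 1) 1
        = PySem.List.pyRange 1 (1 + ((j * c : Nat) : Int)) 1
          ++ PySem.List.pyRange (1 + ((j * c : Nat) : Int)) (((m * c : Nat) : Int) + 1) 1 := by
      apply PySem.List.pyRange_one_append
      · omega
      · have : j * c ≤ m * c := Nat.mul_le_mul_right c (by omega)
        omega
    have hsplit2 : PySem.List.pyRange (1 + ((j * c : Nat) : Int)) (((m * c : Nat) : Int) + 1) 1
        = PySem.List.pyRange (1 + ((j * c : Nat) : Int)) (1 + (((j + 1) * c : Nat) : Int)) 1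
          ++ PySem.List.pyRange (1 + (((j + 1) * c : Nat) : Int)) (((m * c : Nat) : Int) + 1) 1 := by
      apply PySem.List.pyRange_one_append
      · have : j * c ≤ (j + 1) * c := Nat.mul_le_mul_right c (by omega)
        omega
      · have : (j + 1) * c ≤ m * c := Nat.mul_le_mul_right c hjm
        omega
    rw [hsplit1, hsplit2]
    have hl1 : (PySem.List.pyRange 1 (1 + ((j * c : Nat) : Int)) 1).length = j * c := by
      rw [PySem.List.length_pyRange_one]; omega
    have hl2 : (PySem.List.pyRange (1 + ((j * c : Nat) : Int)) (1 + (((j + 1) * c : Nat) : Int)) 1).length = c := by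
      rw [PySem.List.length_pyRange_one]
      have : j * c ≤ (j + 1) * c := Nat.mul_le_mul_right c (by omega)
      have h1 : (j + 1) * c = j * c + c := by ring
      omega
    rw [List.drop_append_of_le_length (by omega), List.drop_of_length_le (le_of_eq hl1),
      List.nil_append]
    have htk : (j + 1) * c - j * c = c := by
      have h1 : (j + 1) * c = j * c + c := by ring
      omega
    rw [htk, List.take_append_of_le_length (le_of_eq hl2.symm),
      List.take_of_length_le (le_of_eq hl2)]
    congr 1
    push_cast [← hcc]
    ring

-- ===== VERDICT (by name: the statement is the Claim_ definition above) =====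
theorem grid_construct_spec : Claim_equal_grid_construct := by
  intro n_line n_col _
  unfold Spec_grid_construct grid_construct grid_construct_alt
  simp only []
  rw [grid_fold_rows, PySem.List.pyRange_one 0 n_line, PySem.List.pyRange_one 0 (max n_line 0),
    List.map_map, List.nil_append]
  simp only [List.length_map, List.length_range]
  have hr : (max n_line 0 - 0).toNat = (n_line - 0).toNat := by omega
  rw [hr]
  apply List.map_congr_left
  intro j hj
  have hj' : (j : Int) < max n_line 0 := by
    rw [List.mem_range] at hj; omega
  simp only [Function.comp, zero_add]
  rw [slice_row (max n_line 0) n_col j hj']
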